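-- pv_equiv track=rewrite | github.com/tanzeemc25/sudoku-solver | SudokuHelpers.py | check_houses
-- ===== SOURCE A (Python) =====
-- def check_houses(puzzle):
--
--     # Puzzle is stored as list of rows. Get the coordinates of the center cells of each 3x3 house
--     centers = [ (1,1), (1,4), (1,7), (4,1), (4,4), (4,7), (7,1), (7,4), (7,7) ]
--
--     # Iterate to check each house
--     i = 0
--     while i < len(centers):
--         r = centers[i][0] # row coordinate
--         c = centers[i][1] # column coordinate
--
--         # If we have the coordinates for the center of the house, we can get the coordinates of all
--         # cell values surrounding it. Get house by using these coordinates.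
--         house = [   puzzle[r-1][c-1], puzzle[r-1][c], puzzle[r-1][c+1], puzzle[r][c-1], puzzle[r][c],
--                     puzzle[r][c+1], puzzle[r+1][c-1], puzzle[r+1][c], puzzle[r+1][c+1] ]
--
--         # Get set of list. If set contains 0 (empty space), or the set does not have length 9,
--         # meaning there were duplicates in the house, the house is invalid, so return false
--         house_set = set(house)
--         if str(0) in house_set or len(house_set) != 9:
--             return False
--
--         i += 1
--
--     # If code reaches here, all houses are valid, therefore return true
--     return True
-- ===== SOURCE B (Python) =====
-- def check_houses(puzzle):
--     # Validate each house by locating its top-left corner from the house index,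
--     # gathering the nine cells with a comprehension, and detecting duplicates by
--     # sorting and scanning adjacent entries (no sets at all).
--     for k in range(9):
--         r0, c0 = 3 * (k // 3), 3 * (k % 3)
--         house = [puzzle[r0 + i][c0 + j] for i in range(3) for j in range(3)]
--         if str(0) in house:
--             return False
--         s = sorted(house)
--         for t in range(8):
--             if s[t] == s[t + 1]:
--                 return False
--     return True
-- ===== Notes on version B (the rewrite author's own statement) =====
-- stated objective: alternative
-- what changed: Replaces A's center-coordinate gathering and set-cardinality test with corner arithmetic from the house index and a sort-then-adjacent-scan duplicate check, using no sets at all.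
import Mathlib
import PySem

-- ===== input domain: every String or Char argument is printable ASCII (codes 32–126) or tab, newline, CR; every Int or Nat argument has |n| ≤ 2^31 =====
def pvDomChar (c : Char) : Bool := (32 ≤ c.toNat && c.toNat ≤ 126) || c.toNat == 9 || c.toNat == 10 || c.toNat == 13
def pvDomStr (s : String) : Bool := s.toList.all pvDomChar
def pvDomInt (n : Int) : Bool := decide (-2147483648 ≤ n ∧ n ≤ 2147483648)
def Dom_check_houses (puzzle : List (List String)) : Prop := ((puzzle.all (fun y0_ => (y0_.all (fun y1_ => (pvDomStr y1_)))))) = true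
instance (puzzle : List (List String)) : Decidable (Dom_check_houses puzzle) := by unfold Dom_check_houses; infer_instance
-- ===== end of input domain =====

-- B locates each house's top-left corner from the house index and detects
-- duplicates by sorting the house and scanning adjacent entries (no sets),
-- instead of A's center-coordinate gathering and set-cardinality test.

-- ===== PORT A =====
-- puzzle[r][c]: under Pre_ every access the loop reaches is in range, so getD is exact.
def pvCell (puzzle : List (List String)) (r c : Int) : String :=
  (PySem.List.pyGet? ((PySem.List.pyGet? puzzle r).getD []) c).getD ""

-- the while loop over the centers list
def pvHousesLoop (puzzle : List (List String)) : List (Int × Int) → Bool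
  | [] => true
  | (r, c) :: rest =>
    let house := [ pvCell puzzle (r-1) (c-1), pvCell puzzle (r-1) c, pvCell puzzle (r-1) (c+1),
                   pvCell puzzle r (c-1), pvCell puzzle r c, pvCell puzzle r (c+1),
                   pvCell puzzle (r+1) (c-1), pvCell puzzle (r+1) c, pvCell puzzle (r+1) (c+1) ]
    let house_set := PySem.Set.ofList house
    if PySem.Set.contains house_set "0" || house_set.length ≠ 9 then false
    else pvHousesLoop puzzle rest

def check_houses (puzzle : List (List String)) : Bool :=
  pvHousesLoop puzzle [ (1,1), (1,4), (1,7), (4,1), (4,4), (4,7), (7,1), (7,4), (7,7) ]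

-- ===== PORT B =====
-- 'for i in range(3) for j in range(3)' gathering of house k around its top-left
-- corner (3*(k//3), 3*(k%3)); cell access is pvCell, exact under Pre_ like A's
def pvGather (puzzle : List (List String)) (k : Int) : List String :=
  (PySem.List.pyRange 0 3 1).flatMap (fun i =>
    (PySem.List.pyRange 0 3 1).map (fun j =>
      pvCell puzzle (3 * PySem.Int.floordiv k 3 + i) (3 * PySem.Int.mod k 3 + j)))

-- 'for t in range(8): if s[t] == s[t+1]: return False' — s always has length 9
-- here (the house is 9 cells), so pyGetD is exact
def pvScan (s : List String) : List Int → Bool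
  | [] => false
  | i :: rest =>
    if PySem.List.pyGetD s i "" == PySem.List.pyGetD s (i+1) "" then true
    else pvScan s rest

-- the 'for k in range(9)' loop with its early returns
def pvAltLoop (puzzle : List (List String)) : List Int → Bool
  | [] => true
  | k :: rest =>
    if "0" ∈ pvGather puzzle k then false
    else if pvScan (PySem.List.sorted (pvGather puzzle k) (fun x => x) false)
        (PySem.List.pyRange 0 8 1) then false
    else pvAltLoop puzzle rest

def check_houses_alt (puzzle : List (List String)) : Bool :=
  pvAltLoop puzzle (PySem.List.pyRange 0 9 1)

-- ===== PRECONDITION & SPEC =====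
-- shape helpers for Pre_: house k of the grid is fully present / present and valid
def pvAvail (p : List (List String)) (k : Nat) : Bool :=
  decide ((k / 3) * 3 + 3 ≤ p.length) &&
    ((p.drop ((k / 3) * 3)).take 3).all (fun row => decide ((k % 3) * 3 + 3 ≤ row.length))

def pvHouseOf (p : List (List String)) (k : Nat) : List String :=
  ((p.drop ((k / 3) * 3)).take 3).flatMap (fun row => (row.drop ((k % 3) * 3)).take 3)

def pvHOk (h : List String) : Bool :=
  !(PySem.Set.contains (PySem.Set.ofList h) "0") && (PySem.Set.ofList h).length == 9

def pvValid (p : List (List String)) (k : Nat) : Bool := pvAvail p k && pvHOk (pvHouseOf p k)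

-- Pre_ is exactly A's return domain: while every house seen so far is valid, the next
-- house must be fully inside the grid (otherwise A raises IndexError there).
def Pre_check_houses (puzzle : List (List String)) : Prop :=
  ∀ k < 9, (∀ j < k, pvValid puzzle j = true) → pvAvail puzzle k = true
instance (puzzle : List (List String)) : Decidable (Pre_check_houses puzzle) := by
  unfold Pre_check_houses; infer_instance

def pvWitness_check_houses : List (List String) :=
  [["1","2","3","4","5","6","7","8","9"],
   ["4","5","6","7","8","9","1","2","3"],
   ["7","8","9","1","2","3","4","5","6"],
   ["2","3","1","5","6","4","8","9","7"],
   ["5","6","4","8","9","7","2","3","1"],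
   ["8","9","7","2","3","1","5","6","4"],
   ["3","1","2","6","4","5","9","7","8"],
   ["6","4","5","9","7","8","3","1","2"],
   ["9","7","8","3","1","2","6","4","5"]]

def Spec_check_houses (puzzle : List (List String)) (out : Bool) : Prop := out = check_houses_alt puzzle
instance (puzzle : List (List String)) (out : Bool) : Decidable (Spec_check_houses puzzle out) := by unfold Spec_check_houses; infer_instance

-- ===== CLAIM (what is proved, stated in full; the proofs are below) =====
def Claim_equal_check_houses : Prop := ∀ (puzzle : List (List String)), Dom_check_houses puzzle → Pre_check_houses puzzle → Spec_check_houses puzzle (check_houses puzzle)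

-- ===== LEMMAS AND PROOFS =====

-- both programs agree with the chain of house validities
def pvAllValid (p : List (List String)) : Bool :=
  pvValid p 0 && (pvValid p 1 && (pvValid p 2 && (pvValid p 3 && (pvValid p 4 &&
    (pvValid p 5 && (pvValid p 6 && (pvValid p 7 && pvValid p 8)))))))

-- ---------- generic list facts ----------
theorem pvTake3 {α : Type} (l : List α) (n : Nat) (h : n + 3 ≤ l.length) :
    (l.drop n).take 3 = [l[n]'(by omega), l[n+1]'(by omega), l[n+2]'(by omega)] := by
  apply List.ext_getElem
  · simp; omega
  · intro i h1 h2
    simp only [List.getElem_take, List.getElem_drop]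
    have h3 : i < 3 := by simp at h1; omega
    interval_cases i <;> simp

theorem pvFoldAddLen (xs : List String) : ∀ (s : PySem.Set String),
    (xs.foldl PySem.Set.add s).length ≤ s.length + xs.length := by
  induction xs with
  | nil => intro s; simp
  | cons x t ih =>
    intro s
    simp only [List.foldl_cons, List.length_cons]
    refine (ih _).trans ?_
    have : (PySem.Set.add s x).length ≤ s.length + 1 := by
      simp [PySem.Set.add]; split_ifs <;> simp
    omega

theorem pvOfListLen (xs : List String) : (PySem.Set.ofList xs).length ≤ xs.length := by
  have := pvFoldAddLen xs PySem.Set.empty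
  simpa [PySem.Set.ofList_eq_foldl, PySem.Set.empty] using this

-- ---------- per-house: B's sort-and-scan test equals pvValid ----------
theorem pvLen_eq9 (p : List (List String)) (k : Nat) (hav : pvAvail p k = true) :
    (pvHouseOf p k).length = 9 := by
  simp only [pvAvail, Bool.and_eq_true, decide_eq_true_eq] at hav
  obtain ⟨hb, hrows⟩ := hav
  rw [pvTake3 p ((k / 3) * 3) hb] at hrows
  simp only [List.all_cons, List.all_nil, Bool.and_eq_true, decide_eq_true_eq] at hrows
  obtain ⟨h1, h2, h3, -⟩ := hrows
  unfold pvHouseOf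
  rw [pvTake3 p ((k / 3) * 3) hb]
  simp only [List.flatMap_cons, List.flatMap_nil, List.length_append, List.length_nil,
    List.length_take, List.length_drop]
  omega

-- length of set(xs) equals len(xs) exactly for duplicate-free xs
theorem pvOfList_len_iff (xs : List String) :
    (PySem.Set.ofList xs).length = xs.length ↔ xs.Nodup := by
  induction xs using List.reverseRecOn with
  | nil => simp
  | append_singleton t x ih =>
    rw [PySem.Set.ofList_append_singleton, PySem.Set.add_eq_ite]
    by_cases hx : x ∈ PySem.Set.ofList t
    · rw [if_pos hx]
      have hxm : x ∈ t := (PySem.Set.mem_ofList _ _).1 hx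
      have hle := pvOfListLen t
      constructor
      · intro h; simp at h; omega
      · intro h; exact absurd hxm (by simp [List.nodup_append] at h; tauto)
    · rw [if_neg hx]
      have hxm : x ∉ t := fun h => hx ((PySem.Set.mem_ofList _ _).2 h)
      simp only [List.length_append, List.length_cons, List.length_nil]
      rw [List.nodup_append]
      simp only [List.nodup_cons, List.not_mem_nil, not_false_iff, List.nodup_nil,
        true_and, and_true, List.mem_singleton]
      constructor
      · intro hh
        refine ⟨ih.1 (by omega), ?_⟩
        intro a ha b hbx hab
        exact hxm (hbx ▸ hab ▸ ha)
      · intro ⟨hnd, _⟩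
        have := ih.2 hnd
        omega

-- a ≤-sorted list is duplicate-free iff no two ADJACENT entries are equal
theorem pvChainLt (s : List String) :
    List.IsChain (· ≤ ·) s → List.IsChain (· ≠ ·) s → List.IsChain (· < ·) s := by
  induction s with
  | nil => intro _ _; exact List.IsChain.nil
  | cons a t ih =>
    intro h1 h2
    cases t with
    | nil => exact List.isChain_singleton a
    | cons b u =>
      rw [List.isChain_cons_cons] at h1 h2 ⊢
      exact ⟨lt_of_le_of_ne h1.1 h2.1, ih h1.2 h2.2⟩

theorem pvNodup_iff_chain (s : List String) (hpw : s.Pairwise (· ≤ ·)) :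
    s.Nodup ↔ List.IsChain (· ≠ ·) s := by
  constructor
  · intro h; exact List.Pairwise.isChain h
  · intro h
    have hlt : List.IsChain (· < ·) s := pvChainLt s (List.Pairwise.isChain hpw) h
    have : s.Pairwise (· < ·) := List.isChain_iff_pairwise.1 hlt
    exact this.imp (fun hab => ne_of_lt hab)

-- ---------- A equals the validity chain (under Pre_) ----------
theorem pvCell_eq (p : List (List String)) (r c : Nat) (hr : r < p.length)
    (hc : c < (p[r]'hr).length) : pvCell p (↑r) (↑c) = (p[r]'hr)[c]'hc := by
  simp [pvCell, PySem.List.pyGet?_natCast, List.getElem?_eq_getElem hr,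
    List.getElem?_eq_getElem hc]

theorem pvHouseA (p : List (List String)) (r0 c0 : Nat)
    (hr : r0 + 3 ≤ p.length)
    (hc : ((p.drop r0).take 3).all (fun row => decide (c0 + 3 ≤ row.length)) = true) :
    [ pvCell p (↑r0) (↑c0), pvCell p (↑r0) (↑c0+1), pvCell p (↑r0) (↑c0+2),
      pvCell p (↑r0+1) (↑c0), pvCell p (↑r0+1) (↑c0+1), pvCell p (↑r0+1) (↑c0+2),
      pvCell p (↑r0+2) (↑c0), pvCell p (↑r0+2) (↑c0+1), pvCell p (↑r0+2) (↑c0+2) ]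
      = ((p.drop r0).take 3).flatMap (fun row => (row.drop c0).take 3) := by
  have hA := pvTake3 p r0 hr
  rw [hA] at hc
  simp only [List.all_cons, List.all_nil, Bool.and_eq_true, decide_eq_true_eq] at hc
  obtain ⟨hc1, hc2, hc3, -⟩ := hc
  have er1 : ((r0 : Int) + 1) = ((r0 + 1 : Nat) : Int) := by push_cast; ring
  have er2 : ((r0 : Int) + 2) = ((r0 + 2 : Nat) : Int) := by push_cast; ring
  have ec1 : ((c0 : Int) + 1) = ((c0 + 1 : Nat) : Int) := by push_cast; ring
  have ec2 : ((c0 : Int) + 2) = ((c0 + 2 : Nat) : Int) := by push_cast; ring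
  rw [hA, er1, er2, ec1, ec2]
  simp only [List.flatMap_cons, List.flatMap_nil, List.append_nil]
  rw [pvTake3 _ c0 (by omega), pvTake3 _ c0 (by omega), pvTake3 _ c0 (by omega)]
  rw [pvCell_eq p r0 c0 (by omega) (by omega),
      pvCell_eq p r0 (c0+1) (by omega) (by omega),
      pvCell_eq p r0 (c0+2) (by omega) (by omega),
      pvCell_eq p (r0+1) c0 (by omega) (by omega),
      pvCell_eq p (r0+1) (c0+1) (by omega) (by omega),
      pvCell_eq p (r0+1) (c0+2) (by omega) (by omega),
      pvCell_eq p (r0+2) c0 (by omega) (by omega),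
      pvCell_eq p (r0+2) (c0+1) (by omega) (by omega),
      pvCell_eq p (r0+2) (c0+2) (by omega) (by omega)]
  simp


-- ---------- B equals the validity chain (under Pre_) ----------
-- pvScan on a 9-element list detects exactly an adjacent duplicate
theorem pvScan9 (a0 a1 a2 a3 a4 a5 a6 a7 a8 : String) :
    pvScan [a0, a1, a2, a3, a4, a5, a6, a7, a8] (PySem.List.pyRange 0 8 1) = false
      ↔ List.IsChain (· ≠ ·) [a0, a1, a2, a3, a4, a5, a6, a7, a8] := by
  rw [show PySem.List.pyRange 0 8 1 = [0, 1, 2, 3, 4, 5, 6, 7] from by decide]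
  simp only [pvScan, pysem, Int.reduceAdd]
  simp only [List.isChain_cons_cons, List.isChain_singleton, and_true]
  by_cases e0 : a0 == a1
  · simp [eq_of_beq e0]
  rw [if_neg (by simp_all)]
  by_cases e1 : a1 == a2
  · simp [eq_of_beq e1]
  rw [if_neg (by simp_all)]
  by_cases e2 : a2 == a3
  · simp [eq_of_beq e2]
  rw [if_neg (by simp_all)]
  by_cases e3 : a3 == a4
  · simp [eq_of_beq e3]
  rw [if_neg (by simp_all)]
  by_cases e4 : a4 == a5
  · simp [eq_of_beq e4]
  rw [if_neg (by simp_all)]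
  by_cases e5 : a5 == a6
  · simp [eq_of_beq e5]
  rw [if_neg (by simp_all)]
  by_cases e6 : a6 == a7
  · simp [eq_of_beq e6]
  rw [if_neg (by simp_all)]
  by_cases e7 : a7 == a8
  · simp [eq_of_beq e7]
  rw [if_neg (by simp_all)]
  simp_all

-- sort-and-scan on a 9-cell house is exactly the duplicate test
theorem pvScanEq (h : List String) (hlen : h.length = 9) :
    pvScan (PySem.List.sorted h (fun x => x) false) (PySem.List.pyRange 0 8 1)
      = !(decide h.Nodup) := by
  set s := PySem.List.sorted h (fun x => x) false with hsdef
  have hperm : s.Perm h := PySem.List.sorted_perm h (fun x => x) false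
  have hslen : s.length = 9 := by rw [hperm.length_eq, hlen]
  have hpw : s.Pairwise (· ≤ ·) := by
    have := PySem.List.sorted_pairwise h (fun x => x)
    simpa using this
  have hnds : h.Nodup ↔ List.IsChain (· ≠ ·) s := by
    rw [← hperm.nodup_iff]
    exact pvNodup_iff_chain s hpw
  rcases s with _|⟨a0,_|⟨a1,_|⟨a2,_|⟨a3,_|⟨a4,_|⟨a5,_|⟨a6,_|⟨a7,_|⟨a8,_|⟨a9,t⟩⟩⟩⟩⟩⟩⟩⟩⟩⟩ <;>
    simp only [List.length_nil, List.length_cons] at hslen <;> try omega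
  have hscan := pvScan9 a0 a1 a2 a3 a4 a5 a6 a7 a8
  by_cases hN : h.Nodup
  · simp [hN, hscan.2 (hnds.1 hN)]
  · have hne : ¬ pvScan [a0, a1, a2, a3, a4, a5, a6, a7, a8] (PySem.List.pyRange 0 8 1) = false :=
      fun hf => hN (hnds.2 (hscan.1 hf))
    rw [Bool.not_eq_false] at hne
    simp [hN, hne]

-- the whole per-house body of B's loop computes pvHOk
theorem pvBStep (h : List String) (hlen : h.length = 9) (X : Bool) :
    (if "0" ∈ h then false
     else if pvScan (PySem.List.sorted h (fun x => x) false) (PySem.List.pyRange 0 8 1)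
       then false else X) = (pvHOk h && X) := by
  by_cases hz : "0" ∈ h
  · rw [if_pos hz]
    simp [pvHOk, hz]
  · rw [if_neg hz, pvScanEq h hlen]
    by_cases hN : h.Nodup
    · have hlen9 : (PySem.Set.ofList h).length = 9 := by
        rw [(pvOfList_len_iff h).mpr hN, hlen]
      simp [hN, pvHOk, hz, hlen9]
    · have hne : (PySem.Set.ofList h).length ≠ 9 := fun he =>
        hN ((pvOfList_len_iff h).mp (by rw [he, hlen]))
      simp [hN, pvHOk, hne]

-- under availability, B's corner gathering is house k
theorem pvGatherEq (p : List (List String)) (k : Nat) (hav : pvAvail p k = true) :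
    pvGather p (k : Int) = pvHouseOf p k := by
  simp only [pvAvail, Bool.and_eq_true, decide_eq_true_eq] at hav
  obtain ⟨hb, hc⟩ := hav
  unfold pvGather
  rw [show PySem.List.pyRange 0 3 1 = [0, 1, 2] from by decide]
  simp only [List.flatMap_cons, List.flatMap_nil, List.map_cons, List.map_nil, List.append_nil]
  have hfd : PySem.Int.floordiv (k : Int) 3 = ((k / 3 : Nat) : Int) := by
    exact_mod_cast PySem.Int.floordiv_natCast k 3
  have hmd : PySem.Int.mod (k : Int) 3 = ((k % 3 : Nat) : Int) := by
    exact_mod_cast PySem.Int.mod_natCast k 3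
  rw [hfd, hmd]
  have er0 : 3 * ((k / 3 : Nat) : Int) + 0 = (((k / 3) * 3 : Nat) : Int) := by push_cast; ring
  have er1 : 3 * ((k / 3 : Nat) : Int) + 1 = (((k / 3) * 3 : Nat) : Int) + 1 := by push_cast; ring
  have er2 : 3 * ((k / 3 : Nat) : Int) + 2 = (((k / 3) * 3 : Nat) : Int) + 2 := by push_cast; ring
  have ec0 : 3 * ((k % 3 : Nat) : Int) + 0 = (((k % 3) * 3 : Nat) : Int) := by push_cast; ring
  have ec1 : 3 * ((k % 3 : Nat) : Int) + 1 = (((k % 3) * 3 : Nat) : Int) + 1 := by push_cast; ring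
  have ec2 : 3 * ((k % 3 : Nat) : Int) + 2 = (((k % 3) * 3 : Nat) : Int) + 2 := by push_cast; ring
  rw [er0, er1, er2, ec0, ec1, ec2]
  exact pvHouseA p ((k / 3) * 3) ((k % 3) * 3) hb hc

set_option maxHeartbeats 4000000 in
theorem pvA_eq (p : List (List String)) (hpre : Pre_check_houses p) :
    check_houses p = pvAllValid p := by
  unfold check_houses
  simp only [pvHousesLoop]
  simp only [Int.reduceSub, Int.reduceAdd]
  have hav0 : pvAvail p 0 = true := hpre 0 (by omega) (fun j hj => absurd hj (by omega))
  have hav0' := hav0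
  simp only [pvAvail, Bool.and_eq_true] at hav0'
  obtain ⟨hb0, hcc0⟩ := hav0'
  have H0 : [ pvCell p 0 0, pvCell p 0 1, pvCell p 0 2, pvCell p 1 0, pvCell p 1 1, pvCell p 1 2, pvCell p 2 0, pvCell p 2 1, pvCell p 2 2 ] = pvHouseOf p 0 := by
    have h := pvHouseA p 0 0 (by have := of_decide_eq_true hb0; omega) hcc0
    unfold pvHouseOf
    norm_num at h ⊢
    exact h
  simp only [H0]
  by_cases hok0 : pvHOk (pvHouseOf p 0) = true
  case neg =>
    have hokf : pvHOk (pvHouseOf p 0) = false := by simpa using hok0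
    have hv0 : pvValid p 0 = false := by simp [pvValid, hokf]
    have hcnd0 := hokf
    simp only [pvHOk, Bool.and_eq_false_iff, Bool.not_eq_false', beq_eq_false_iff_ne,
      ne_eq] at hcnd0
    rw [if_pos (hcnd0.elim (fun h => by rw [h]; simp) (fun h => by simp [h]))]
    simp [pvAllValid,  hv0]
  case pos =>
  have hv0 : pvValid p 0 = true := by simp [pvValid, hav0, hok0]
  have hpt0 := hok0
  simp only [pvHOk, Bool.and_eq_true, Bool.not_eq_true', beq_iff_eq] at hpt0
  have hnm0 : "0" ∉ pvHouseOf p 0 := by simpa using hpt0.1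
  rw [if_neg (by simp [hnm0, hpt0.2])]

  have hav1 : pvAvail p 1 = true := hpre 1 (by omega) (fun j hj => by interval_cases j <;> assumption)
  have hav1' := hav1
  simp only [pvAvail, Bool.and_eq_true] at hav1'
  obtain ⟨hb1, hcc1⟩ := hav1'
  have H1 : [ pvCell p 0 3, pvCell p 0 4, pvCell p 0 5, pvCell p 1 3, pvCell p 1 4, pvCell p 1 5, pvCell p 2 3, pvCell p 2 4, pvCell p 2 5 ] = pvHouseOf p 1 := by
    have h := pvHouseA p 0 3 (by have := of_decide_eq_true hb1; omega) hcc1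
    unfold pvHouseOf
    norm_num at h ⊢
    exact h
  simp only [H1]
  by_cases hok1 : pvHOk (pvHouseOf p 1) = true
  case neg =>
    have hokf : pvHOk (pvHouseOf p 1) = false := by simpa using hok1
    have hv1 : pvValid p 1 = false := by simp [pvValid, hokf]
    have hcnd1 := hokf
    simp only [pvHOk, Bool.and_eq_false_iff, Bool.not_eq_false', beq_eq_false_iff_ne,
      ne_eq] at hcnd1
    rw [if_pos (hcnd1.elim (fun h => by rw [h]; simp) (fun h => by simp [h]))]
    simp [pvAllValid, hv0, hv1]
  case pos =>
  have hv1 : pvValid p 1 = true := by simp [pvValid, hav1, hok1]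
  have hpt1 := hok1
  simp only [pvHOk, Bool.and_eq_true, Bool.not_eq_true', beq_iff_eq] at hpt1
  have hnm1 : "0" ∉ pvHouseOf p 1 := by simpa using hpt1.1
  rw [if_neg (by simp [hnm1, hpt1.2])]

  have hav2 : pvAvail p 2 = true := hpre 2 (by omega) (fun j hj => by interval_cases j <;> assumption)
  have hav2' := hav2
  simp only [pvAvail, Bool.and_eq_true] at hav2'
  obtain ⟨hb2, hcc2⟩ := hav2'
  have H2 : [ pvCell p 0 6, pvCell p 0 7, pvCell p 0 8, pvCell p 1 6, pvCell p 1 7, pvCell p 1 8, pvCell p 2 6, pvCell p 2 7, pvCell p 2 8 ] = pvHouseOf p 2 := by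
    have h := pvHouseA p 0 6 (by have := of_decide_eq_true hb2; omega) hcc2
    unfold pvHouseOf
    norm_num at h ⊢
    exact h
  simp only [H2]
  by_cases hok2 : pvHOk (pvHouseOf p 2) = true
  case neg =>
    have hokf : pvHOk (pvHouseOf p 2) = false := by simpa using hok2
    have hv2 : pvValid p 2 = false := by simp [pvValid, hokf]
    have hcnd2 := hokf
    simp only [pvHOk, Bool.and_eq_false_iff, Bool.not_eq_false', beq_eq_false_iff_ne,
      ne_eq] at hcnd2
    rw [if_pos (hcnd2.elim (fun h => by rw [h]; simp) (fun h => by simp [h]))]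
    simp [pvAllValid, hv0, hv1, hv2]
  case pos =>
  have hv2 : pvValid p 2 = true := by simp [pvValid, hav2, hok2]
  have hpt2 := hok2
  simp only [pvHOk, Bool.and_eq_true, Bool.not_eq_true', beq_iff_eq] at hpt2
  have hnm2 : "0" ∉ pvHouseOf p 2 := by simpa using hpt2.1
  rw [if_neg (by simp [hnm2, hpt2.2])]

  have hav3 : pvAvail p 3 = true := hpre 3 (by omega) (fun j hj => by interval_cases j <;> assumption)
  have hav3' := hav3
  simp only [pvAvail, Bool.and_eq_true] at hav3'
  obtain ⟨hb3, hcc3⟩ := hav3'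
  have H3 : [ pvCell p 3 0, pvCell p 3 1, pvCell p 3 2, pvCell p 4 0, pvCell p 4 1, pvCell p 4 2, pvCell p 5 0, pvCell p 5 1, pvCell p 5 2 ] = pvHouseOf p 3 := by
    have h := pvHouseA p 3 0 (by have := of_decide_eq_true hb3; omega) hcc3
    unfold pvHouseOf
    norm_num at h ⊢
    exact h
  simp only [H3]
  by_cases hok3 : pvHOk (pvHouseOf p 3) = true
  case neg =>
    have hokf : pvHOk (pvHouseOf p 3) = false := by simpa using hok3
    have hv3 : pvValid p 3 = false := by simp [pvValid, hokf]
    have hcnd3 := hokf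
    simp only [pvHOk, Bool.and_eq_false_iff, Bool.not_eq_false', beq_eq_false_iff_ne,
      ne_eq] at hcnd3
    rw [if_pos (hcnd3.elim (fun h => by rw [h]; simp) (fun h => by simp [h]))]
    simp [pvAllValid, hv0, hv1, hv2, hv3]
  case pos =>
  have hv3 : pvValid p 3 = true := by simp [pvValid, hav3, hok3]
  have hpt3 := hok3
  simp only [pvHOk, Bool.and_eq_true, Bool.not_eq_true', beq_iff_eq] at hpt3
  have hnm3 : "0" ∉ pvHouseOf p 3 := by simpa using hpt3.1
  rw [if_neg (by simp [hnm3, hpt3.2])]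

  have hav4 : pvAvail p 4 = true := hpre 4 (by omega) (fun j hj => by interval_cases j <;> assumption)
  have hav4' := hav4
  simp only [pvAvail, Bool.and_eq_true] at hav4'
  obtain ⟨hb4, hcc4⟩ := hav4'
  have H4 : [ pvCell p 3 3, pvCell p 3 4, pvCell p 3 5, pvCell p 4 3, pvCell p 4 4, pvCell p 4 5, pvCell p 5 3, pvCell p 5 4, pvCell p 5 5 ] = pvHouseOf p 4 := by
    have h := pvHouseA p 3 3 (by have := of_decide_eq_true hb4; omega) hcc4
    unfold pvHouseOf
    norm_num at h ⊢
    exact h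
  simp only [H4]
  by_cases hok4 : pvHOk (pvHouseOf p 4) = true
  case neg =>
    have hokf : pvHOk (pvHouseOf p 4) = false := by simpa using hok4
    have hv4 : pvValid p 4 = false := by simp [pvValid, hokf]
    have hcnd4 := hokf
    simp only [pvHOk, Bool.and_eq_false_iff, Bool.not_eq_false', beq_eq_false_iff_ne,
      ne_eq] at hcnd4
    rw [if_pos (hcnd4.elim (fun h => by rw [h]; simp) (fun h => by simp [h]))]
    simp [pvAllValid, hv0, hv1, hv2, hv3, hv4]
  case pos =>
  have hv4 : pvValid p 4 = true := by simp [pvValid, hav4, hok4]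
  have hpt4 := hok4
  simp only [pvHOk, Bool.and_eq_true, Bool.not_eq_true', beq_iff_eq] at hpt4
  have hnm4 : "0" ∉ pvHouseOf p 4 := by simpa using hpt4.1
  rw [if_neg (by simp [hnm4, hpt4.2])]

  have hav5 : pvAvail p 5 = true := hpre 5 (by omega) (fun j hj => by interval_cases j <;> assumption)
  have hav5' := hav5
  simp only [pvAvail, Bool.and_eq_true] at hav5'
  obtain ⟨hb5, hcc5⟩ := hav5'
  have H5 : [ pvCell p 3 6, pvCell p 3 7, pvCell p 3 8, pvCell p 4 6, pvCell p 4 7, pvCell p 4 8, pvCell p 5 6, pvCell p 5 7, pvCell p 5 8 ] = pvHouseOf p 5 := by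
    have h := pvHouseA p 3 6 (by have := of_decide_eq_true hb5; omega) hcc5
    unfold pvHouseOf
    norm_num at h ⊢
    exact h
  simp only [H5]
  by_cases hok5 : pvHOk (pvHouseOf p 5) = true
  case neg =>
    have hokf : pvHOk (pvHouseOf p 5) = false := by simpa using hok5
    have hv5 : pvValid p 5 = false := by simp [pvValid, hokf]
    have hcnd5 := hokf
    simp only [pvHOk, Bool.and_eq_false_iff, Bool.not_eq_false', beq_eq_false_iff_ne,
      ne_eq] at hcnd5
    rw [if_pos (hcnd5.elim (fun h => by rw [h]; simp) (fun h => by simp [h]))]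
    simp [pvAllValid, hv0, hv1, hv2, hv3, hv4, hv5]
  case pos =>
  have hv5 : pvValid p 5 = true := by simp [pvValid, hav5, hok5]
  have hpt5 := hok5
  simp only [pvHOk, Bool.and_eq_true, Bool.not_eq_true', beq_iff_eq] at hpt5
  have hnm5 : "0" ∉ pvHouseOf p 5 := by simpa using hpt5.1
  rw [if_neg (by simp [hnm5, hpt5.2])]

  have hav6 : pvAvail p 6 = true := hpre 6 (by omega) (fun j hj => by interval_cases j <;> assumption)
  have hav6' := hav6
  simp only [pvAvail, Bool.and_eq_true] at hav6'
  obtain ⟨hb6, hcc6⟩ := hav6'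
  have H6 : [ pvCell p 6 0, pvCell p 6 1, pvCell p 6 2, pvCell p 7 0, pvCell p 7 1, pvCell p 7 2, pvCell p 8 0, pvCell p 8 1, pvCell p 8 2 ] = pvHouseOf p 6 := by
    have h := pvHouseA p 6 0 (by have := of_decide_eq_true hb6; omega) hcc6
    unfold pvHouseOf
    norm_num at h ⊢
    exact h
  simp only [H6]
  by_cases hok6 : pvHOk (pvHouseOf p 6) = true
  case neg =>
    have hokf : pvHOk (pvHouseOf p 6) = false := by simpa using hok6
    have hv6 : pvValid p 6 = false := by simp [pvValid, hokf]
    have hcnd6 := hokf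
    simp only [pvHOk, Bool.and_eq_false_iff, Bool.not_eq_false', beq_eq_false_iff_ne,
      ne_eq] at hcnd6
    rw [if_pos (hcnd6.elim (fun h => by rw [h]; simp) (fun h => by simp [h]))]
    simp [pvAllValid, hv0, hv1, hv2, hv3, hv4, hv5, hv6]
  case pos =>
  have hv6 : pvValid p 6 = true := by simp [pvValid, hav6, hok6]
  have hpt6 := hok6
  simp only [pvHOk, Bool.and_eq_true, Bool.not_eq_true', beq_iff_eq] at hpt6
  have hnm6 : "0" ∉ pvHouseOf p 6 := by simpa using hpt6.1
  rw [if_neg (by simp [hnm6, hpt6.2])]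

  have hav7 : pvAvail p 7 = true := hpre 7 (by omega) (fun j hj => by interval_cases j <;> assumption)
  have hav7' := hav7
  simp only [pvAvail, Bool.and_eq_true] at hav7'
  obtain ⟨hb7, hcc7⟩ := hav7'
  have H7 : [ pvCell p 6 3, pvCell p 6 4, pvCell p 6 5, pvCell p 7 3, pvCell p 7 4, pvCell p 7 5, pvCell p 8 3, pvCell p 8 4, pvCell p 8 5 ] = pvHouseOf p 7 := by
    have h := pvHouseA p 6 3 (by have := of_decide_eq_true hb7; omega) hcc7
    unfold pvHouseOf
    norm_num at h ⊢
    exact h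
  simp only [H7]
  by_cases hok7 : pvHOk (pvHouseOf p 7) = true
  case neg =>
    have hokf : pvHOk (pvHouseOf p 7) = false := by simpa using hok7
    have hv7 : pvValid p 7 = false := by simp [pvValid, hokf]
    have hcnd7 := hokf
    simp only [pvHOk, Bool.and_eq_false_iff, Bool.not_eq_false', beq_eq_false_iff_ne,
      ne_eq] at hcnd7
    rw [if_pos (hcnd7.elim (fun h => by rw [h]; simp) (fun h => by simp [h]))]
    simp [pvAllValid, hv0, hv1, hv2, hv3, hv4, hv5, hv6, hv7]
  case pos =>
  have hv7 : pvValid p 7 = true := by simp [pvValid, hav7, hok7]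
  have hpt7 := hok7
  simp only [pvHOk, Bool.and_eq_true, Bool.not_eq_true', beq_iff_eq] at hpt7
  have hnm7 : "0" ∉ pvHouseOf p 7 := by simpa using hpt7.1
  rw [if_neg (by simp [hnm7, hpt7.2])]

  have hav8 : pvAvail p 8 = true := hpre 8 (by omega) (fun j hj => by interval_cases j <;> assumption)
  have hav8' := hav8
  simp only [pvAvail, Bool.and_eq_true] at hav8'
  obtain ⟨hb8, hcc8⟩ := hav8'
  have H8 : [ pvCell p 6 6, pvCell p 6 7, pvCell p 6 8, pvCell p 7 6, pvCell p 7 7, pvCell p 7 8, pvCell p 8 6, pvCell p 8 7, pvCell p 8 8 ] = pvHouseOf p 8 := by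
    have h := pvHouseA p 6 6 (by have := of_decide_eq_true hb8; omega) hcc8
    unfold pvHouseOf
    norm_num at h ⊢
    exact h
  simp only [H8]
  by_cases hok8 : pvHOk (pvHouseOf p 8) = true
  case neg =>
    have hokf : pvHOk (pvHouseOf p 8) = false := by simpa using hok8
    have hv8 : pvValid p 8 = false := by simp [pvValid, hokf]
    have hcnd8 := hokf
    simp only [pvHOk, Bool.and_eq_false_iff, Bool.not_eq_false', beq_eq_false_iff_ne,
      ne_eq] at hcnd8
    rw [if_pos (hcnd8.elim (fun h => by rw [h]; simp) (fun h => by simp [h]))]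
    simp [pvAllValid, hv0, hv1, hv2, hv3, hv4, hv5, hv6, hv7, hv8]
  case pos =>
  have hv8 : pvValid p 8 = true := by simp [pvValid, hav8, hok8]
  have hpt8 := hok8
  simp only [pvHOk, Bool.and_eq_true, Bool.not_eq_true', beq_iff_eq] at hpt8
  have hnm8 : "0" ∉ pvHouseOf p 8 := by simpa using hpt8.1
  rw [if_neg (by simp [hnm8, hpt8.2])]
  simp [pvAllValid, hv0, hv1, hv2, hv3, hv4, hv5, hv6, hv7, hv8]


set_option maxHeartbeats 1000000 in
theorem pvB_eq (p : List (List String)) (hpre : Pre_check_houses p) :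
    check_houses_alt p = pvAllValid p := by
  unfold check_houses_alt
  rw [show PySem.List.pyRange 0 9 1 = [0, 1, 2, 3, 4, 5, 6, 7, 8] from by decide]
  simp only [pvAltLoop]
  have hav0 : pvAvail p 0 = true := hpre 0 (by omega) (fun j hj => absurd hj (by omega))
  have hG0 : pvGather p (0 : Int) = pvHouseOf p 0 := by
    have := pvGatherEq p 0 hav0
    exact_mod_cast this
  rw [hG0, pvBStep _ (pvLen_eq9 p 0 hav0)]
  by_cases hok0 : pvHOk (pvHouseOf p 0) = true
  case neg =>
    have hokf0 : pvHOk (pvHouseOf p 0) = false := by simpa using hok0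
    have hv0 : pvValid p 0 = false := by simp [pvValid, hokf0]
    rw [hokf0]
    simp [pvAllValid,  hv0]
  case pos =>
  have hv0 : pvValid p 0 = true := by simp [pvValid, hav0, hok0]
  rw [hok0, Bool.true_and]

  have hav1 : pvAvail p 1 = true := hpre 1 (by omega) (fun j hj => by interval_cases j <;> assumption)
  have hG1 : pvGather p (1 : Int) = pvHouseOf p 1 := by
    have := pvGatherEq p 1 hav1
    exact_mod_cast this
  rw [hG1, pvBStep _ (pvLen_eq9 p 1 hav1)]
  by_cases hok1 : pvHOk (pvHouseOf p 1) = true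
  case neg =>
    have hokf1 : pvHOk (pvHouseOf p 1) = false := by simpa using hok1
    have hv1 : pvValid p 1 = false := by simp [pvValid, hokf1]
    rw [hokf1]
    simp [pvAllValid, hv0, hv1]
  case pos =>
  have hv1 : pvValid p 1 = true := by simp [pvValid, hav1, hok1]
  rw [hok1, Bool.true_and]

  have hav2 : pvAvail p 2 = true := hpre 2 (by omega) (fun j hj => by interval_cases j <;> assumption)
  have hG2 : pvGather p (2 : Int) = pvHouseOf p 2 := by
    have := pvGatherEq p 2 hav2
    exact_mod_cast this
  rw [hG2, pvBStep _ (pvLen_eq9 p 2 hav2)]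
  by_cases hok2 : pvHOk (pvHouseOf p 2) = true
  case neg =>
    have hokf2 : pvHOk (pvHouseOf p 2) = false := by simpa using hok2
    have hv2 : pvValid p 2 = false := by simp [pvValid, hokf2]
    rw [hokf2]
    simp [pvAllValid, hv0, hv1, hv2]
  case pos =>
  have hv2 : pvValid p 2 = true := by simp [pvValid, hav2, hok2]
  rw [hok2, Bool.true_and]

  have hav3 : pvAvail p 3 = true := hpre 3 (by omega) (fun j hj => by interval_cases j <;> assumption)
  have hG3 : pvGather p (3 : Int) = pvHouseOf p 3 := by
    have := pvGatherEq p 3 hav3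
    exact_mod_cast this
  rw [hG3, pvBStep _ (pvLen_eq9 p 3 hav3)]
  by_cases hok3 : pvHOk (pvHouseOf p 3) = true
  case neg =>
    have hokf3 : pvHOk (pvHouseOf p 3) = false := by simpa using hok3
    have hv3 : pvValid p 3 = false := by simp [pvValid, hokf3]
    rw [hokf3]
    simp [pvAllValid, hv0, hv1, hv2, hv3]
  case pos =>
  have hv3 : pvValid p 3 = true := by simp [pvValid, hav3, hok3]
  rw [hok3, Bool.true_and]

  have hav4 : pvAvail p 4 = true := hpre 4 (by omega) (fun j hj => by interval_cases j <;> assumption)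
  have hG4 : pvGather p (4 : Int) = pvHouseOf p 4 := by
    have := pvGatherEq p 4 hav4
    exact_mod_cast this
  rw [hG4, pvBStep _ (pvLen_eq9 p 4 hav4)]
  by_cases hok4 : pvHOk (pvHouseOf p 4) = true
  case neg =>
    have hokf4 : pvHOk (pvHouseOf p 4) = false := by simpa using hok4
    have hv4 : pvValid p 4 = false := by simp [pvValid, hokf4]
    rw [hokf4]
    simp [pvAllValid, hv0, hv1, hv2, hv3, hv4]
  case pos =>
  have hv4 : pvValid p 4 = true := by simp [pvValid, hav4, hok4]
  rw [hok4, Bool.true_and]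

  have hav5 : pvAvail p 5 = true := hpre 5 (by omega) (fun j hj => by interval_cases j <;> assumption)
  have hG5 : pvGather p (5 : Int) = pvHouseOf p 5 := by
    have := pvGatherEq p 5 hav5
    exact_mod_cast this
  rw [hG5, pvBStep _ (pvLen_eq9 p 5 hav5)]
  by_cases hok5 : pvHOk (pvHouseOf p 5) = true
  case neg =>
    have hokf5 : pvHOk (pvHouseOf p 5) = false := by simpa using hok5
    have hv5 : pvValid p 5 = false := by simp [pvValid, hokf5]
    rw [hokf5]
    simp [pvAllValid, hv0, hv1, hv2, hv3, hv4, hv5]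
  case pos =>
  have hv5 : pvValid p 5 = true := by simp [pvValid, hav5, hok5]
  rw [hok5, Bool.true_and]

  have hav6 : pvAvail p 6 = true := hpre 6 (by omega) (fun j hj => by interval_cases j <;> assumption)
  have hG6 : pvGather p (6 : Int) = pvHouseOf p 6 := by
    have := pvGatherEq p 6 hav6
    exact_mod_cast this
  rw [hG6, pvBStep _ (pvLen_eq9 p 6 hav6)]
  by_cases hok6 : pvHOk (pvHouseOf p 6) = true
  case neg =>
    have hokf6 : pvHOk (pvHouseOf p 6) = false := by simpa using hok6
    have hv6 : pvValid p 6 = false := by simp [pvValid, hokf6]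
    rw [hokf6]
    simp [pvAllValid, hv0, hv1, hv2, hv3, hv4, hv5, hv6]
  case pos =>
  have hv6 : pvValid p 6 = true := by simp [pvValid, hav6, hok6]
  rw [hok6, Bool.true_and]

  have hav7 : pvAvail p 7 = true := hpre 7 (by omega) (fun j hj => by interval_cases j <;> assumption)
  have hG7 : pvGather p (7 : Int) = pvHouseOf p 7 := by
    have := pvGatherEq p 7 hav7
    exact_mod_cast this
  rw [hG7, pvBStep _ (pvLen_eq9 p 7 hav7)]
  by_cases hok7 : pvHOk (pvHouseOf p 7) = true
  case neg =>
    have hokf7 : pvHOk (pvHouseOf p 7) = false := by simpa using hok7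
    have hv7 : pvValid p 7 = false := by simp [pvValid, hokf7]
    rw [hokf7]
    simp [pvAllValid, hv0, hv1, hv2, hv3, hv4, hv5, hv6, hv7]
  case pos =>
  have hv7 : pvValid p 7 = true := by simp [pvValid, hav7, hok7]
  rw [hok7, Bool.true_and]

  have hav8 : pvAvail p 8 = true := hpre 8 (by omega) (fun j hj => by interval_cases j <;> assumption)
  have hG8 : pvGather p (8 : Int) = pvHouseOf p 8 := by
    have := pvGatherEq p 8 hav8
    exact_mod_cast this
  rw [hG8, pvBStep _ (pvLen_eq9 p 8 hav8)]
  by_cases hok8 : pvHOk (pvHouseOf p 8) = true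
  case neg =>
    have hokf8 : pvHOk (pvHouseOf p 8) = false := by simpa using hok8
    have hv8 : pvValid p 8 = false := by simp [pvValid, hokf8]
    rw [hokf8]
    simp [pvAllValid, hv0, hv1, hv2, hv3, hv4, hv5, hv6, hv7, hv8]
  case pos =>
  have hv8 : pvValid p 8 = true := by simp [pvValid, hav8, hok8]
  rw [hok8, Bool.true_and]
  simp [pvAllValid, hv0, hv1, hv2, hv3, hv4, hv5, hv6, hv7, hv8]

-- ===== VERDICT (by name: the statement is the Claim_ definition above) =====
theorem check_houses_spec : Claim_equal_check_houses := by
  intro p _ hpre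
  show check_houses p = check_houses_alt p
  rw [pvA_eq p hpre, pvB_eq p hpre]
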